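-- pv_equiv track=rewrite | github.com/aboutcode-org/vulnerablecode | vulnerabilities/importers/mozilla.py | _parse_md_front_matter
-- ===== SOURCE A (Python) =====
-- def _parse_md_front_matter(lines):
--     """
--     Return the YAML and MD sections.
--     :param: lines iterator
--     :return: str YAML, str Markdown
--     """
--     # fm_count: 0: init, 1: in YAML, 2: in Markdown
--     fm_count = 0
--     yaml_lines = []
--     md_lines = []
--     for line in lines:
--         # first line we care about is FM start
--         if fm_count < 2 and line.strip() == "---":
--             fm_count += 1
--             continue
--
--         if fm_count == 1:
--             yaml_lines.append(line)
--
--         if fm_count == 2: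
--             md_lines.append(line)
--
--     return "".join(yaml_lines), "".join(md_lines)
-- ===== SOURCE B (Python) =====
-- def _parse_md_front_matter(lines):
--     it = iter(lines)
--     # phase 1: skip everything up to and including the first '---' delimiter
--     for line in it:
--         if line.strip() == "---":
--             break
--     # phase 2: collect YAML until the closing '---' delimiter
--     yaml_lines = []
--     for line in it:
--         if line.strip() == "---":
--             break
--         yaml_lines.append(line)
--     # phase 3: everything left is Markdown
--     return "".join(yaml_lines), "".join(it)
-- ===== Notes on version B (the rewrite author's own statement) =====
-- stated objective: simpler
-- what changed: Replaces A's single fold with a three-valued fm_count state variable and per-line branch checks by three sequential phase scans over one shared iterator: skip through the first '---', collect YAML until the next '---', join the remainder as Markdown.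
import Mathlib
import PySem

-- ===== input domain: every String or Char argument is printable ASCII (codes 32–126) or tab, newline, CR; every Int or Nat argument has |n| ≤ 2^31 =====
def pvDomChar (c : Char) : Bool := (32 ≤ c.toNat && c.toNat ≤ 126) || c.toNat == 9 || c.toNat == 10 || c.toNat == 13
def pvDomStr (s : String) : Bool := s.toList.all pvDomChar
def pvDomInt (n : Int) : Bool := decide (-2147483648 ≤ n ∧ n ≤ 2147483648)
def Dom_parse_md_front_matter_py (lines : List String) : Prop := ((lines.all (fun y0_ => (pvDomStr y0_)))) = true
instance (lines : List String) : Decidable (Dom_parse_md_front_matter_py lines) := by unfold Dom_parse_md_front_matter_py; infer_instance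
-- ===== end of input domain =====

-- B replaces A's single fold with a counter state variable by three sequential
-- phase scans (skip to the first '---', take YAML until the next, rest is Markdown);
-- objective: simpler.

-- ===== PORT A =====
-- one fold step of A's for-loop over state (fm_count, yaml_lines, md_lines)
def pvStepA (st : Int × List String × List String) (line : String) :
    Int × List String × List String :=
  let fm := st.1
  let ys := st.2.1
  let ms := st.2.2
  if fm < 2 ∧ PySem.Str.strip line = "---" then (fm + 1, ys, ms)
  else
    let ys := if fm = 1 then ys ++ [line] else ys
    let ms := if fm = 2 then ms ++ [line] else ms
    (fm, ys, ms)

def parse_md_front_matter_py (lines : List String) : String × String :=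
  let st := lines.foldl pvStepA (0, [], [])
  (PySem.Str.join "" st.2.1, PySem.Str.join "" st.2.2)

-- ===== PORT B =====
-- Source B's phase loops over one shared iterator: a for-loop that only breaks
-- consumes lines while the predicate fails, then the delimiter itself.
def pvNotSep (line : String) : Bool := !(PySem.Str.strip line == "---")

def parse_md_front_matter_py_alt (lines : List String) : String × String :=
  let rest1 := (lines.dropWhile pvNotSep).drop 1          -- phase 1: skip through first '---'
  let yaml_lines := rest1.takeWhile pvNotSep              -- phase 2: YAML until next '---'
  let rest2 := (rest1.dropWhile pvNotSep).drop 1          -- the iterator after phase 2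
  (PySem.Str.join "" yaml_lines, PySem.Str.join "" rest2) -- phase 3: join the remainder

-- ===== PRECONDITION & SPEC =====
def Spec_parse_md_front_matter_py (lines : List String) (out : String × String) : Prop := out = parse_md_front_matter_py_alt lines
instance (lines : List String) (out : String × String) : Decidable (Spec_parse_md_front_matter_py lines out) := by unfold Spec_parse_md_front_matter_py; infer_instance

-- ===== CLAIM (what is proved, stated in full; the proofs are below) =====
def Claim_equal_parse_md_front_matter_py : Prop := ∀ (lines : List String), Dom_parse_md_front_matter_py lines → Spec_parse_md_front_matter_py lines (parse_md_front_matter_py lines)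

-- ===== LEMMAS AND PROOFS =====

-- phase 3: with fm_count = 2 the fold appends every line to md_lines
theorem pvFold2 (l : List String) (ys ms : List String) :
    l.foldl pvStepA (2, ys, ms) = (2, ys, ms ++ l) := by
  induction l generalizing ms with
  | nil => simp
  | cons a t ih =>
    have hstep : pvStepA (2, ys, ms) a = (2, ys, ms ++ [a]) := by
      norm_num [pvStepA]
    simp only [List.foldl_cons, hstep]
    rw [ih]
    simp

-- phase 2: with fm_count = 1 the fold takes YAML lines until the next delimiter
theorem pvFold1 (l : List String) (ys : List String) :
    l.foldl pvStepA (1, ys, []) =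
      (if (l.dropWhile pvNotSep) = [] then (1 : Int) else 2,
       ys ++ l.takeWhile pvNotSep,
       ((l.dropWhile pvNotSep).drop 1)) := by
  induction l generalizing ys with
  | nil => simp
  | cons a t ih =>
    by_cases h : pvNotSep a
    · have hs : ¬ (PySem.Str.strip a = "---") := by
        simpa [pvNotSep] using h
      have hstep : pvStepA (1, ys, []) a = (1, ys ++ [a], ([] : List String)) := by
        norm_num [pvStepA, hs]
      simp only [List.foldl_cons, hstep]
      rw [ih]
      simp [h]
    · have hs : PySem.Str.strip a = "---" := by
        by_contra hc; exact h (by simp [pvNotSep, hc])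
      have hstep : pvStepA (1, ys, []) a = (2, ys, ([] : List String)) := by
        norm_num [pvStepA, hs]
      simp only [List.foldl_cons, hstep]
      rw [pvFold2]
      simp [h]

-- phase 1: with fm_count = 0 the fold discards lines until the first delimiter
theorem pvFold0 (l : List String) :
    (l.foldl pvStepA (0, [], [])).2 =
      (((l.dropWhile pvNotSep).drop 1).foldl pvStepA (1, [], [])).2 := by
  induction l with
  | nil => simp
  | cons a t ih =>
    by_cases h : pvNotSep a
    · have hs : ¬ (PySem.Str.strip a = "---") := by
        simpa [pvNotSep] using h
      have hstep : pvStepA (0, [], []) a = (0, ([] : List String), ([] : List String)) := by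
        norm_num [pvStepA, hs]
      simp only [List.foldl_cons, hstep]
      rw [ih]
      simp [h]
    · have hs : PySem.Str.strip a = "---" := by
        by_contra hc; exact h (by simp [pvNotSep, hc])
      have hstep : pvStepA (0, [], []) a = (1, ([] : List String), ([] : List String)) := by
        norm_num [pvStepA, hs]
      simp only [List.foldl_cons, hstep]
      simp [h]

-- ===== VERDICT (by name: the statement is the Claim_ definition above) =====
theorem parse_md_front_matter_py_spec : Claim_equal_parse_md_front_matter_py := by
  intro lines _
  unfold Spec_parse_md_front_matter_py parse_md_front_matter_py parse_md_front_matter_py_alt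
  have h0 := pvFold0 lines
  rw [pvFold1] at h0
  simp [h0]
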